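-- pv_equiv track=rewrite | github.com/thearod5/Tracer | src/api/datasets/builder/trace_parser.py | get_delimiter_in_segment
-- ===== SOURCE A (Python) =====
-- def get_delimiter_in_segment(segment: str, high_precedence=None, low_precedence=None):
--     """
--     Searches segment for highest precedence delimiters.
--     :param low_precedence: delimiters with low precedence (default is space)
--     :param high_precedence: delimiters which if found return immediately
--     :param segment: the string to search
--     :return: char representing the delimiter
--     """
--
--     if high_precedence is None:
--         high_precedence = ["-", ":"]
--
--     if low_precedence is None:
--         low_precedence = [" ", "\t"]
--
--     current_delimiter = None
--
--     for char in segment: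
--         if char in high_precedence:
--             return char
--         if char in low_precedence:
--             current_delimiter = char
--     if current_delimiter is None:
--         raise Exception("No delimiters in %s" % segment)
--
--     return current_delimiter
-- ===== SOURCE B (Python) =====
-- def get_delimiter_in_segment(segment: str, high_precedence=None, low_precedence=None):
--     high = ["-", ":"] if high_precedence is None else high_precedence
--     low = [" ", "\t"] if low_precedence is None else low_precedence
--     hi = next((c for c in segment if c in high), None)
--     if hi is not None:
--         return hi
--     lo = next((c for c in reversed(segment) if c in low), None)
--     if lo is None:
--         raise Exception("No delimiters in %s" % segment)
--     return lo
-- ===== Notes on version B (the rewrite author's own statement) =====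
-- stated objective: alternative
-- what changed: Replaces A's single stateful left-to-right scan (which keeps overwriting a current low-precedence delimiter) with two independent stateless passes: find the first high-precedence char, and only if absent find the last low-precedence char by scanning from the right.
import Mathlib
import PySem

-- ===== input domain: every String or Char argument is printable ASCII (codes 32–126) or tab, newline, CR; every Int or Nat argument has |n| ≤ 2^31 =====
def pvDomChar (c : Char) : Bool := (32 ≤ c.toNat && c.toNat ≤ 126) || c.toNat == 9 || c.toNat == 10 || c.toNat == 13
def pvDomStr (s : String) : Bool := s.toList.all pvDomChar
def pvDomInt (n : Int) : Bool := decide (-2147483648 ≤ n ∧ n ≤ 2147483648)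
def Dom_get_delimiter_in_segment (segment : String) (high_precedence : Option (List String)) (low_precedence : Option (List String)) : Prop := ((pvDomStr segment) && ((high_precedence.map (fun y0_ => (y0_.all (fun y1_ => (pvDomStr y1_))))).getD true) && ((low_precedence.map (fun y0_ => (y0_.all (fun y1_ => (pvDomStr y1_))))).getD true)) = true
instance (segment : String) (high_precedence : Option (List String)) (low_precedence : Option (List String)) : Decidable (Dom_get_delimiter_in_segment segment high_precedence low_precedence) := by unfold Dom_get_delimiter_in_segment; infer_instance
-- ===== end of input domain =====

-- B replaces A's single stateful scan by two independent stateless passes (first high-precedence hit, else last low-precedence hit from the right): an alternative decomposition of the same cost.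


-- ===== PORT A =====
-- Port of A: one left-to-right scan with early return on a high-precedence char,
-- keeping the most recent low-precedence char; none = the Python raises (excluded by Pre_).
def pvGoA (high low : List String) : List Char → Option String → Option String
  | [], cur => cur
  | c :: rest, cur =>
    if String.ofList [c] ∈ high then some (String.ofList [c])
    else if String.ofList [c] ∈ low then pvGoA high low rest (some (String.ofList [c]))
    else pvGoA high low rest cur

def get_delimiter_in_segment (segment : String) (high_precedence : Option (List String)) (low_precedence : Option (List String)) : String :=
  let high := high_precedence.getD ["-", ":"]
  let low := low_precedence.getD [" ", "\t"]
  (pvGoA high low segment.toList none).getD ""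


-- ===== PORT B =====
-- Port of B: first pass finds the first high-precedence char; only if it fails,
-- a right-to-left pass finds the last low-precedence char; "" = the Python raises (excluded by Pre_).
def get_delimiter_in_segment_alt (segment : String) (high_precedence : Option (List String)) (low_precedence : Option (List String)) : String :=
  let high := high_precedence.getD ["-", ":"]
  let low := low_precedence.getD [" ", "\t"]
  match segment.toList.find? (fun c => decide (String.ofList [c] ∈ high)) with
  | some c => String.ofList [c]
  | none =>
    match segment.toList.reverse.find? (fun c => decide (String.ofList [c] ∈ low)) with
    | some c => String.ofList [c]
    | none => ""


-- ===== PRECONDITION & SPEC =====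
-- Pre_ excludes exactly the inputs on which the Python A raises its "No delimiters" Exception:
-- segments containing no character from either delimiter list (with defaults applied).
def Pre_get_delimiter_in_segment (segment : String) (high_precedence : Option (List String)) (low_precedence : Option (List String)) : Prop :=
  (segment.toList.any fun c =>
    (high_precedence.getD ["-", ":"]).contains (String.ofList [c]) ||
    (low_precedence.getD [" ", "\t"]).contains (String.ofList [c])) = true
instance (segment : String) (high_precedence : Option (List String)) (low_precedence : Option (List String)) : Decidable (Pre_get_delimiter_in_segment segment high_precedence low_precedence) := by unfold Pre_get_delimiter_in_segment; infer_instance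
def pvWitness_get_delimiter_in_segment : String × Option (List String) × Option (List String) := ("-", none, none)

def Spec_get_delimiter_in_segment (segment : String) (high_precedence : Option (List String)) (low_precedence : Option (List String)) (out : String) : Prop := out = get_delimiter_in_segment_alt segment high_precedence low_precedence
instance (segment : String) (high_precedence : Option (List String)) (low_precedence : Option (List String)) (out : String) : Decidable (Spec_get_delimiter_in_segment segment high_precedence low_precedence out) := by unfold Spec_get_delimiter_in_segment; infer_instance

-- ===== CLAIM (what is proved, stated in full; the proofs are below) =====
def Claim_equal_get_delimiter_in_segment : Prop := ∀ (segment : String) (high_precedence : Option (List String)) (low_precedence : Option (List String)), Dom_get_delimiter_in_segment segment high_precedence low_precedence → Pre_get_delimiter_in_segment segment high_precedence low_precedence → Spec_get_delimiter_in_segment segment high_precedence low_precedence (get_delimiter_in_segment segment high_precedence low_precedence)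

-- ===== LEMMAS AND PROOFS =====
-- The stateful scan equals: first high-precedence hit, else last low-precedence hit, else the accumulator.
theorem pvGoA_eq (high low : List String) (l : List Char) (cur : Option String) :
    pvGoA high low l cur =
      match l.find? (fun c => decide (String.ofList [c] ∈ high)) with
      | some c => some (String.ofList [c])
      | none =>
        match l.reverse.find? (fun c => decide (String.ofList [c] ∈ low)) with
        | some c => some (String.ofList [c])
        | none => cur := by
  induction l generalizing cur with
  | nil => simp [pvGoA]
  | cons c rest ih =>
    by_cases hh : String.ofList [c] ∈ high
    · simp [pvGoA, hh, List.find?]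
    · by_cases hl : String.ofList [c] ∈ low
      · simp only [pvGoA, ih, List.find?, hh, decide_false,
          List.reverse_cons, List.find?_append, hl, decide_true]
        cases rest.find? (fun c => decide (String.ofList [c] ∈ high)) <;>
          cases rest.reverse.find? (fun c => decide (String.ofList [c] ∈ low)) <;> rfl
      · simp only [pvGoA, ih, List.find?, hh, decide_false,
          List.reverse_cons, List.find?_append, hl]
        cases rest.find? (fun c => decide (String.ofList [c] ∈ high)) <;>
          cases rest.reverse.find? (fun c => decide (String.ofList [c] ∈ low)) <;> rfl


-- ===== VERDICT (by name: the statement is the Claim_ definition above) =====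
theorem get_delimiter_in_segment_spec : Claim_equal_get_delimiter_in_segment := by
  intro segment high_precedence low_precedence _ _
  unfold Spec_get_delimiter_in_segment get_delimiter_in_segment get_delimiter_in_segment_alt
  simp only [pvGoA_eq]
  cases segment.toList.find? (fun c => decide (String.ofList [c] ∈ high_precedence.getD ["-", ":"])) <;>
    cases segment.toList.reverse.find? (fun c => decide (String.ofList [c] ∈ low_precedence.getD [" ", "\t"])) <;> rfl
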